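-- pv_equiv track=rewrite | github.com/KelvinChi/LeetcodeBank | 594_longest_harmonious_subsequence.py | lhs
-- ===== SOURCE A (Python) =====
-- def lhs(lis):
--     temp = list(sorted(set(lis)))
--     count = []
--     result = 0
--     for i in temp:
--         count.append(lis.count(i))
--     for i in range(len(count) - 1):
--         if result < count[i] + count[i + 1]:
--             result = count[i] + count[i + 1]
--     return result
-- ===== SOURCE B (Python) =====
-- def lhs(lis):
--     s = sorted(lis)
--     best = 0
--     prev_run = 0
--     run = 0
--     last = None
--     for x in s:
--         if run and x == last:
--             run += 1
--         else:
--             if prev_run: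
--                 best = max(best, prev_run + run)
--             prev_run, run = run, 1
--             last = x
--     if prev_run:
--         best = max(best, prev_run + run)
--     return best
-- ===== Notes on version B (the rewrite author's own statement) =====
-- stated objective: faster
-- what changed: B sorts the whole list once and does a single run-length scan over it (tracking previous-run and current-run lengths in an accumulator), instead of building the distinct-value list and counting each distinct value by a separate full pass over lis.
import Mathlib
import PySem

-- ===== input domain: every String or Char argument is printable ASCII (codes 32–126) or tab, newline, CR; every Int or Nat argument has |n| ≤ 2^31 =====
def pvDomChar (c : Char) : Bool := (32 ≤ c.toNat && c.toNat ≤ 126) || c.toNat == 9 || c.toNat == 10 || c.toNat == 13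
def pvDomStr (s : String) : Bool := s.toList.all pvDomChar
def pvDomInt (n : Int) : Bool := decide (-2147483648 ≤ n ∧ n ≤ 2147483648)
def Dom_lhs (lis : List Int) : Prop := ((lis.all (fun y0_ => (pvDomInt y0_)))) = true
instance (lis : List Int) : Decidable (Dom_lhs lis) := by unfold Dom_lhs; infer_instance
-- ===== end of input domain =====

-- B sorts the whole list once and does a single run-length scan over it,
-- instead of counting each distinct value by a separate full pass over lis (faster).

-- ===== PORT A =====
def lhs (lis : List Int) : Int :=
  let temp := PySem.List.sorted (PySem.Set.ofList lis) (fun x => x) false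
  let count := temp.foldl (fun acc i => acc ++ [(PySem.List.count lis i : Int)]) ([] : List Int)
  (PySem.List.pyRange 0 ((count.length : Int) - 1) 1).foldl
    (fun result i =>
      if result < PySem.List.pyGetD count i 0 + PySem.List.pyGetD count (i + 1) 0 then
        PySem.List.pyGetD count i 0 + PySem.List.pyGetD count (i + 1) 0
      else result) 0

-- ===== PORT B =====
-- one step of B's run-length scan over the sorted list: state (best, prev_run, run, last)
def lhsAltStep (st : Int × Int × Int × Option Int) (x : Int) : Int × Int × Int × Option Int :=
  match st with
  | (best, prevRun, run, last) =>
    if run ≠ 0 ∧ last = some x then (best, prevRun, run + 1, last)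
    else
      let best' := if prevRun ≠ 0 then max best (prevRun + run) else best
      (best', run, 1, some x)

def lhs_alt (lis : List Int) : Int :=
  let s := PySem.List.sorted lis (fun x => x) false
  match s.foldl lhsAltStep (0, 0, 0, none) with
  | (best, prevRun, run, _) => if prevRun ≠ 0 then max best (prevRun + run) else best

-- ===== PRECONDITION & SPEC =====
def Spec_lhs (lis : List Int) (out : Int) : Prop := out = lhs_alt lis
instance (lis : List Int) (out : Int) : Decidable (Spec_lhs lis out) := by unfold Spec_lhs; infer_instance

-- ===== CLAIM (what is proved, stated in full; the proofs are below) =====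
def Claim_equal_lhs : Prop := ∀ (lis : List Int), Dom_lhs lis → Spec_lhs lis (lhs lis)

-- ===== LEMMAS AND PROOFS =====

-- the "best so far" update, and the finalizer of B's state
def pvUpd (b p r : Int) : Int := if p ≠ 0 then max b (p + r) else b

def pvFin (st : Int × Int × Int × Option Int) : Int :=
  match st with
  | (best, prevRun, run, _) => if prevRun ≠ 0 then max best (prevRun + run) else best

-- A's index loop over adjacent entries of c equals a fold over c zipped with its tail
theorem pv_natfold (c : List Int) (r : Int) :
    (List.range (c.length - 1)).foldl
      (fun res k => if res < c.getD k 0 + c.getD (k+1) 0 then c.getD k 0 + c.getD (k+1) 0 else res) r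
    = (c.zip c.tail).foldl (fun best p => if p.1 + p.2 > best then p.1 + p.2 else best) r := by
  match c with
  | [] => simp
  | [x] => simp
  | x :: y :: cs =>
    have ih := pv_natfold (y :: cs)
    simp only [List.length_cons, Nat.add_sub_cancel, List.tail_cons, List.getD_cons_succ] at ih
    simp only [List.length_cons, Nat.add_sub_cancel, List.range_succ_eq_map, List.foldl_cons,
      List.foldl_map, List.zip_cons_cons, List.tail_cons, List.getD_cons_zero, List.getD_cons_succ]
    rw [ih]

theorem pv_idx_fold_eq_zip (c : List Int) (r : Int) :
    (PySem.List.pyRange 0 ((c.length : Int) - 1) 1).foldl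
      (fun result i =>
        if result < PySem.List.pyGetD c i 0 + PySem.List.pyGetD c (i + 1) 0 then
          PySem.List.pyGetD c i 0 + PySem.List.pyGetD c (i + 1) 0
        else result) r
    = (c.zip c.tail).foldl
        (fun best p => if p.1 + p.2 > best then p.1 + p.2 else best) r := by
  rw [PySem.List.pyRange_one, List.foldl_map]
  have h1 : ((c.length : Int) - 1 - 0).toNat = c.length - 1 := by omega
  rw [h1]
  have e : ∀ k : Nat, ((k:Int) + 1) = ((k+1 : Nat) : Int) := by
    intro k; push_cast; ring
  simp only [zero_add, e, PySem.List.pyGetD_natCast]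
  exact pv_natfold c r

-- the two "take the larger" loop bodies coincide
theorem pv_foldl_if_eq_max (l : List (Int × Int)) (b : Int) :
    l.foldl (fun best p => if p.1 + p.2 > best then p.1 + p.2 else best) b
      = l.foldl (fun best q => max best (q.1 + q.2)) b := by
  induction l generalizing b with
  | nil => rfl
  | cons h t ih =>
    simp only [List.foldl_cons, ih]
    congr 1
    rw [max_def]; split_ifs <;> omega

-- running B's step over a run of k further copies of the current value only bumps the run length
theorem pv_run (k : Nat) (b p r : Int) (v : Int) (hr : 0 < r) :
    (List.replicate k v).foldl lhsAltStep (b, p, r, some v) = (b, p, r + k, some v) := by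
  induction k generalizing r with
  | zero => simp
  | succ n ih =>
    rw [List.replicate_succ, List.foldl_cons]
    have h1 : lhsAltStep (b, p, r, some v) v = (b, p, r + 1, some v) := by
      simp [lhsAltStep, hr.ne']
    have e : r + 1 + (n : Int) = r + ((n + 1 : Nat) : Int) := by push_cast; ring
    rw [h1, ih (r + 1) (by omega), e]

-- entering a fresh value v (last ≠ some v) then running its whole run of length k
theorem pv_group (k : Nat) (hk : k ≠ 0) (b p r : Int) (l : Option Int) (v : Int)
    (hl : l ≠ some v) :
    (List.replicate k v).foldl lhsAltStep (b, p, r, l) = (pvUpd b p r, r, (k : Int), some v) := by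
  obtain ⟨n, rfl⟩ : ∃ n, k = n + 1 := ⟨k - 1, by omega⟩
  rw [List.replicate_succ, List.foldl_cons]
  have h1 : lhsAltStep (b, p, r, l) v = (pvUpd b p r, r, 1, some v) := by
    simp only [lhsAltStep, pvUpd]
    rw [if_neg (by rintro ⟨_, h⟩; exact hl h)]
  have e : (1 : Int) + (n : Int) = ((n + 1 : Nat) : Int) := by push_cast; ring
  rw [h1, pv_run n (pvUpd b p r) r 1 v one_pos, e]

-- B's scan over a strictly increasing chain of runs computes the adjacent-pair maximum
theorem pv_chain (ks : List Int) (c : Int → Nat) (lastv b p r : Int)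
    (hinc : (lastv :: ks).Pairwise (· < ·)) (hc : ∀ v ∈ ks, c v ≠ 0) (hr : 0 < r) :
    pvFin ((ks.flatMap (fun v => List.replicate (c v) v)).foldl lhsAltStep (b, p, r, some lastv))
      = ((r :: ks.map (fun v => (c v : Int))).zip (ks.map (fun v => (c v : Int)))).foldl
          (fun best q => max best (q.1 + q.2)) (pvUpd b p r) := by
  induction ks generalizing lastv b p r with
  | nil => simp [pvFin, pvUpd]
  | cons v ks' ih =>
    simp only [List.flatMap_cons, List.foldl_append, List.map_cons, List.zip_cons_cons,
      List.foldl_cons]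
    have hlt : lastv < v := (List.pairwise_cons.1 hinc).1 v (by simp)
    rw [pv_group (c v) (hc v (by simp)) b p r (some lastv) v (by simp; omega)]
    have hcv : (0:Int) < (c v : Int) := by
      have := hc v (by simp); omega
    rw [ih v (pvUpd b p r) r ((c v : Int)) (List.pairwise_cons.1 hinc).2
      (fun w hw => hc w (by simp [hw])) hcv]
    congr 1
    simp [pvUpd, hr.ne']

-- count of a in the replicate-flatMap of a nodup list
theorem pv_count_flatMap (ks : List Int) (c : Int → Nat) (hnd : ks.Nodup) (a : Int) :
    (ks.flatMap (fun v => List.replicate (c v) v)).count a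
      = if a ∈ ks then c a else 0 := by
  induction ks with
  | nil => simp
  | cons v ks' ih =>
    rw [List.flatMap_cons, List.count_append, List.count_replicate,
      ih (List.nodup_cons.1 hnd).2]
    by_cases hav : a = v
    · subst hav
      simp [(List.nodup_cons.1 hnd).1]
    · simp [hav, Ne.symm hav]

-- the replicate-flatMap of a strictly increasing list is weakly sorted
theorem pv_flatMap_pairwise (ks : List Int) (c : Int → Nat) (hinc : ks.Pairwise (· < ·)) :
    (ks.flatMap (fun v => List.replicate (c v) v)).Pairwise (· ≤ ·) := by
  rw [List.pairwise_flatMap]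
  refine ⟨fun v _ => List.pairwise_replicate.2 (Or.inr le_rfl), ?_⟩
  refine hinc.imp_of_mem ?_
  intro v w hv hw hvw x hx y hy
  rw [List.eq_of_mem_replicate hx, List.eq_of_mem_replicate hy]
  omega

-- sorted(lis) is the concatenation of the runs of the sorted distinct values
theorem pv_sorted_eq_flatMap (lis : List Int) :
    PySem.List.sorted lis (fun x => x) false
      = (PySem.List.sorted (PySem.Set.ofList lis) (fun x => x) false).flatMap
          (fun v => List.replicate (List.count v lis) v) := by
  have hmem : ∀ a, a ∈ PySem.List.sorted (PySem.Set.ofList lis) (fun x => x) false ↔ a ∈ lis := by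
    intro a
    rw [PySem.List.mem_sorted, PySem.Set.mem_ofList]
  have hnd : (PySem.List.sorted (PySem.Set.ofList lis) (fun x => x) false).Nodup :=
    (PySem.List.sorted_perm (PySem.Set.ofList lis) (fun x => x) false).nodup_iff.2
      (PySem.Set.nodup_ofList (xs := lis))
  have hperm : ((PySem.List.sorted (PySem.Set.ofList lis) (fun x => x) false).flatMap
      (fun v => List.replicate (List.count v lis) v)).Perm lis := by
    rw [List.perm_iff_count]
    intro a
    rw [pv_count_flatMap _ _ hnd a]
    by_cases ha : a ∈ PySem.List.sorted (PySem.Set.ofList lis) (fun x => x) false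
    · simp [ha]
    · rw [if_neg ha]
      exact (List.count_eq_zero_of_not_mem (fun h => ha ((hmem a).2 h))).symm
  exact PySem.List.sorted_id_eq_of_perm_of_pairwise lis _ hperm
    (pv_flatMap_pairwise _ _ (PySem.List.sorted_ofList_pairwise_lt lis))

-- A's port, reduced to the adjacent-pair fold over the counts of the sorted distinct values
theorem pv_A_side (lis : List Int) :
    lhs lis
      = ((((PySem.List.sorted (PySem.Set.ofList lis) (fun x => x) false).map
            (fun v => (List.count v lis : Int))).zip
          ((PySem.List.sorted (PySem.Set.ofList lis) (fun x => x) false).map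
            (fun v => (List.count v lis : Int))).tail).foldl
          (fun best p => if p.1 + p.2 > best then p.1 + p.2 else best) 0) := by
  unfold lhs
  simp only [PySem.List.foldl_append_singleton_eq_map, List.nil_append]
  exact pv_idx_fold_eq_zip _ 0

-- B's port, reduced to the same adjacent-pair fold
theorem pv_B_side (lis : List Int) :
    lhs_alt lis
      = ((((PySem.List.sorted (PySem.Set.ofList lis) (fun x => x) false).map
            (fun v => (List.count v lis : Int))).zip
          ((PySem.List.sorted (PySem.Set.ofList lis) (fun x => x) false).map
            (fun v => (List.count v lis : Int))).tail).foldl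
          (fun best q => max best (q.1 + q.2)) 0) := by
  have hc : ∀ v ∈ PySem.List.sorted (PySem.Set.ofList lis) (fun x => x) false,
      List.count v lis ≠ 0 := by
    intro v hv
    have hvl : v ∈ lis := by
      rw [PySem.List.mem_sorted, PySem.Set.mem_ofList] at hv; exact hv
    have := List.count_pos_iff.2 hvl
    omega
  have hinc := PySem.List.sorted_ofList_pairwise_lt lis
  show pvFin ((PySem.List.sorted lis (fun x => x) false).foldl lhsAltStep (0, 0, 0, none)) = _
  rw [pv_sorted_eq_flatMap lis]
  cases h : PySem.List.sorted (PySem.Set.ofList lis) (fun x => x) false with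
  | nil => simp [pvFin]
  | cons v ks' =>
    rw [h] at hinc hc
    simp only [List.flatMap_cons, List.foldl_append, List.map_cons, List.tail_cons]
    rw [pv_group (List.count v lis) (hc v (by simp)) 0 0 0 none v (by simp)]
    have hcv : (0:Int) < (List.count v lis : Int) := by
      have := hc v (by simp); omega
    rw [pv_chain ks' (fun w => List.count w lis) v (pvUpd 0 0 0) 0 ((List.count v lis : Int))
      hinc (fun w hw => hc w (by simp [hw])) hcv]
    simp [pvUpd]

-- ===== VERDICT (by name: the statement is the Claim_ definition above) =====
theorem lhs_spec : Claim_equal_lhs := by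
  intro lis _
  show lhs lis = lhs_alt lis
  rw [pv_A_side, pv_B_side, pv_foldl_if_eq_max]
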